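-- pv_equiv track=rewrite | github.com/joshanashakya/dissertation | workspace/dataset/java-python/GeeksForGeeks/3243/A/2.py | createPalindrome
-- ===== SOURCE A (Python) =====
-- def createPalindrome(_input, isOdd):
--
--     n = palin = _input
--
--     # checks if number of digits is odd or even
--     # if odd then neglect the last digit of _input in
--     # finding reverse as in case of odd number of
--     # digits middle element occur once
--     if isOdd:
--         n //= 10
--
--     # Creates palindrome by just appending revers
--     # of number to itself
--     while n > 0:
--         palin = palin * 10 + (n % 10)
--         n //= 10
--
--     return palin
-- ===== SOURCE B (Python) =====
-- def createPalindrome(_input, isOdd):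
--     # Collect the decimal digits of the input, least-significant first.
--     ds = []
--     m = _input
--     while m > 0:
--         ds.append(m % 10)
--         m //= 10
--     # Digits to append (the middle digit is dropped when the length is odd).
--     tail = ds[1:] if isOdd else ds
--     k = len(tail)
--     return _input * 10 ** k + sum(d * 10 ** (k - 1 - i) for i, d in enumerate(tail))
-- ===== Notes on version B (the rewrite author's own statement) =====
-- stated objective: alternative
-- what changed: B materialises the digit list once, slices off the middle digit for the odd case, and combines everything in one closed-form expression (input shifted by 10**k plus an explicit power sum), replacing A's fused Horner-style accumulator loop over two mutating variables.
import Mathlib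
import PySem

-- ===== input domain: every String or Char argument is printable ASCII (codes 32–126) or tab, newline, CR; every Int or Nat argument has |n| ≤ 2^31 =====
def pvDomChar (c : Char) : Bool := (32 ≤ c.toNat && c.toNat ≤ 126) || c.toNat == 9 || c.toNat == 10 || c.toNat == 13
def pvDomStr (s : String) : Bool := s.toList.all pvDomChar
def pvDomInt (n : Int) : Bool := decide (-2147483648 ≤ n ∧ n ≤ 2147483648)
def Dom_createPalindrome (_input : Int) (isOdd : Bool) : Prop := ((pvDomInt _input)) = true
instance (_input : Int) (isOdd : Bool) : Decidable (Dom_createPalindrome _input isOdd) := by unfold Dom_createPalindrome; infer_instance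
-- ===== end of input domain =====

-- B replaces A's fused accumulator loop by a digit list, a slice and a closed-form power sum (alternative decomposition, same cost).

-- ===== PORT A =====
-- 'while n > 0: palin = palin * 10 + (n % 10); n //= 10'
def createPalindromeLoop (palin n : Int) : Int :=
  if h : 0 < n then
    createPalindromeLoop (palin * 10 + PySem.Int.mod n 10) (PySem.Int.floordiv n 10)
  else palin
termination_by n.toNat
decreasing_by
  rw [PySem.Int.floordiv_eq_ediv_of_pos (by omega : (0:Int) < 10)]
  omega

def createPalindrome (_input : Int) (isOdd : Bool) : Int :=
  let palin := _input
  let n := if isOdd then PySem.Int.floordiv _input 10 else _input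
  createPalindromeLoop palin n

-- ===== PORT B =====
-- 'while m > 0: ds.append(m % 10); m //= 10'  (least-significant digit first)
def altDigits (m : Int) : List Int :=
  if h : 0 < m then PySem.Int.mod m 10 :: altDigits (PySem.Int.floordiv m 10)
  else []
termination_by m.toNat
decreasing_by
  rw [PySem.Int.floordiv_eq_ediv_of_pos (by omega : (0:Int) < 10)]
  omega

-- k = len(tail) is a Nat here (len ≥ 0); the exponent k - 1 - i uses Nat subtraction,
-- exact since enumerate only yields indices i ≤ k - 1.
def createPalindrome_alt (_input : Int) (isOdd : Bool) : Int :=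
  let ds := altDigits _input
  let tail := if isOdd then PySem.List.slice ds (some 1) none else ds
  let k := tail.length
  _input * 10 ^ k + ((PySem.List.enumerate tail).map (fun p => p.2 * 10 ^ (k - 1 - p.1.toNat))).sum

-- ===== PRECONDITION & SPEC =====
def Spec_createPalindrome (_input : Int) (isOdd : Bool) (out : Int) : Prop := out = createPalindrome_alt _input isOdd
instance (_input : Int) (isOdd : Bool) (out : Int) : Decidable (Spec_createPalindrome _input isOdd out) := by unfold Spec_createPalindrome; infer_instance

-- ===== CLAIM (what is proved, stated in full; the proofs are below) =====
def Claim_equal_createPalindrome : Prop := ∀ (_input : Int) (isOdd : Bool), Dom_createPalindrome _input isOdd → Spec_createPalindrome _input isOdd (createPalindrome _input isOdd)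

-- ===== LEMMAS AND PROOFS =====

-- the value of an LSB-first digit list read back MSB-first
def tailVal : List Int → Int
  | [] => 0
  | d :: ds => d * 10 ^ ds.length + tailVal ds

lemma enumerate_sum_eq_tailVal (ds : List Int) (s k : Nat) (hk : k = s + ds.length) :
    ((PySem.List.enumerate ds (s : Int)).map (fun p => p.2 * 10 ^ (k - 1 - p.1.toNat))).sum
      = tailVal ds := by
  induction ds generalizing s with
  | nil => simp [PySem.List.enumerate_nil, tailVal]
  | cons d ds ih =>
    simp only [PySem.List.enumerate_cons, List.map_cons, List.sum_cons, Int.toNat_natCast]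
    have h1 : ((s : Int) + 1) = ((s + 1 : Nat) : Int) := by push_cast; ring
    rw [h1, ih (s + 1) (by simp at hk; omega)]
    have h2 : k - 1 - s = ds.length := by simp at hk; omega
    rw [h2, tailVal]

lemma enumerate_sum_zero (ds : List Int) :
    ((PySem.List.enumerate ds 0).map (fun p => p.2 * 10 ^ (ds.length - 1 - p.1.toNat))).sum
      = tailVal ds := by
  have h := enumerate_sum_eq_tailVal ds 0 ds.length (by simp)
  simpa using h

lemma loop_eq_tailVal (n : Int) (palin : Int) :
    createPalindromeLoop palin n = palin * 10 ^ (altDigits n).length + tailVal (altDigits n) := by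
  by_cases h : 0 < n
  · rw [createPalindromeLoop, altDigits]
    simp only [h, dite_true]
    rw [loop_eq_tailVal (PySem.Int.floordiv n 10) (palin * 10 + PySem.Int.mod n 10)]
    simp only [List.length_cons, tailVal]
    ring
  · rw [createPalindromeLoop, altDigits]
    simp [h, tailVal]
termination_by n.toNat
decreasing_by
  rw [PySem.Int.floordiv_eq_ediv_of_pos (by omega : (0:Int) < 10)]
  omega

lemma altDigits_tail (m : Int) : (altDigits m).tail = altDigits (PySem.Int.floordiv m 10) := by
  by_cases h : 0 < m
  · rw [altDigits]; simp [h]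
  · rw [altDigits, altDigits]
    simp [h]
    omega

-- ===== VERDICT (by name: the statement is the Claim_ definition above) =====
theorem createPalindrome_spec : Claim_equal_createPalindrome := by
  intro _input isOdd _
  show createPalindrome _input isOdd = createPalindrome_alt _input isOdd
  simp only [createPalindrome, createPalindrome_alt]
  rw [PySem.List.slice_from_one, altDigits_tail]
  have key : ∀ t : Int, createPalindromeLoop _input t
      = _input * 10 ^ (altDigits t).length
        + ((PySem.List.enumerate (altDigits t)).map
            (fun p => p.2 * 10 ^ ((altDigits t).length - 1 - p.1.toNat))).sum := by
    intro t
    rw [loop_eq_tailVal, enumerate_sum_zero]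
  cases isOdd <;> simp [key]
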